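-- pv_equiv track=rewrite | github.com/andremedeiro/ufcg | prog1/exercicios/9Unidade/Toppl/AndreLucas_Toppl.py | filtra_alunos
-- ===== SOURCE A (Python) =====
-- def filtra_alunos(lista, inscritos, media):
--     eliminados = 0
--
--     if len(inscritos) != 0:
--         for indice in range(len(lista)-1, -1, -1):
--             if lista[indice][0] not in inscritos:
--                 for i in range(indice, len(lista)-1):
--                     lista[i], lista[i+1] = lista[i+1], lista[i]
--                 lista.pop()
--                 eliminados += 1
--
--         for indice in range(len(lista)-1, -1, -1):
--             if lista[indice][1] < media:
--                 for i in range(indice, len(lista)-1):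
--                     lista[i], lista[i+1] = lista[i+1], lista[i]
--                 lista.pop()
--                 eliminados += 1
--
--         return eliminados
--
--     return len(eliminados)
-- ===== SOURCE B (Python) =====
-- # One combined pass instead of A's two repeated in-place deletion scans; count = length difference.
-- # Like A, mutates lista in place (final contents match A's wherever A returns).
-- def filtra_alunos(lista, inscritos, media):
--     original = len(lista)
--     lista[:] = [a for a in lista if a[0] in inscritos and a[1] >= media]
--     return original - len(lista)
-- ===== Notes on version B (the rewrite author's own statement) =====
-- stated objective: simpler
-- what changed: Replaces A's two descending-index passes with O(n) bubble-to-end deletions each and a running counter by a single list-comprehension filter pass, returning the length difference.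
import Mathlib
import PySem

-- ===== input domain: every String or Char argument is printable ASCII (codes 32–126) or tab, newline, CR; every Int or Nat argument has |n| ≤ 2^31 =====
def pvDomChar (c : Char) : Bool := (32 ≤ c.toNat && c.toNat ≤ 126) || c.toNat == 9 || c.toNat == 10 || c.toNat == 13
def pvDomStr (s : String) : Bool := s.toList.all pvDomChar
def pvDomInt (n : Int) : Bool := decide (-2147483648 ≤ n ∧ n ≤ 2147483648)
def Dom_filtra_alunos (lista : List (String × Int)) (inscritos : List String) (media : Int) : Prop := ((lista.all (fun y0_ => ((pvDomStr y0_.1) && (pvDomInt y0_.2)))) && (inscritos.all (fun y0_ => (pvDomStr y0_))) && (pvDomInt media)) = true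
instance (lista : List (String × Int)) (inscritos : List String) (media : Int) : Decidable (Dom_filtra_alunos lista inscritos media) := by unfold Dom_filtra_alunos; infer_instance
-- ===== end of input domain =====

-- B replaces A's two in-place descending deletion passes (bubble-to-end + pop, running counter)
-- by one combined filter pass, returning original length minus kept length; proved return-value
-- equal whenever A returns (inscritos nonempty). Both Pythons mutate lista in place (to the same
-- final contents); the equivalence proved here is about the RETURN value.


-- ===== PORT A =====
-- 'lista[i], lista[i+1] = lista[i+1], lista[i]': both indices are in range in every execution
-- A reaches (Python would raise IndexError otherwise); the fallback branch is unreachable.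
def pvSwapStep (xs : List (String × Int)) (i : Int) : List (String × Int) :=
  match PySem.List.pyGet? xs (i + 1), PySem.List.pyGet? xs i with
  | some b, some a => PySem.List.pySetD (PySem.List.pySetD xs i b) (i + 1) a
  | _, _ => xs

-- body of one iteration of A's deletion loop (the shape both of A's loops share), with the
-- delete-condition q of that loop; '.dropLast' is 'lista.pop()' (the list is nonempty there).
def pvDelStep (q : String × Int → Bool) (s : List (String × Int) × Int) (indice : Int) :
    List (String × Int) × Int :=
  match PySem.List.pyGet? s.1 indice with
  | some a =>
      if q a then
        let l := (PySem.List.pyRange indice ((s.1.length : Int) - 1) 1).foldl pvSwapStep s.1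
        (l.dropLast, s.2 + 1)
      else s
  | none => s

-- 'for indice in range(len(lista)-1, -1, -1): …' over the running (lista, eliminados) state
def pvDelLoop (q : String × Int → Bool) (s : List (String × Int) × Int) :
    List (String × Int) × Int :=
  (PySem.List.pyRange ((s.1.length : Int) - 1) (-1) (-1)).foldl (pvDelStep q) s

def filtra_alunos (lista : List (String × Int)) (inscritos : List String) (media : Int) : Int :=
  if (inscritos.length : Int) ≠ 0 then
    let s1 := pvDelLoop (fun a => !(inscritos.contains a.1)) (lista, 0)
    let s2 := pvDelLoop (fun a => decide (a.2 < media)) s1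
    s2.2
  else
    0  -- unreachable under Pre_: Python raises TypeError on 'len(eliminados)' here

-- ===== PORT B =====
def filtra_alunos_alt (lista : List (String × Int)) (inscritos : List String) (media : Int) : Int :=
  let kept := lista.filter (fun a => inscritos.contains a.1 && decide (media ≤ a.2))
  (lista.length : Int) - (kept.length : Int)

-- ===== PRECONDITION & SPEC =====
-- Pre_ excludes exactly empty inscritos, where A raises TypeError ('len(eliminados)').
def Pre_filtra_alunos (lista : List (String × Int)) (inscritos : List String) (media : Int) : Prop :=
  inscritos ≠ []
instance (lista : List (String × Int)) (inscritos : List String) (media : Int) : Decidable (Pre_filtra_alunos lista inscritos media) := by unfold Pre_filtra_alunos; infer_instance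

def pvWitness_filtra_alunos : (List (String × Int)) × List String × Int :=
  ([("ana", 7), ("bob", 3)], ["ana"], 5)

def Spec_filtra_alunos (lista : List (String × Int)) (inscritos : List String) (media : Int) (out : Int) : Prop := out = filtra_alunos_alt lista inscritos media
instance (lista : List (String × Int)) (inscritos : List String) (media : Int) (out : Int) : Decidable (Spec_filtra_alunos lista inscritos media out) := by unfold Spec_filtra_alunos; infer_instance

-- ===== CLAIM (what is proved, stated in full; the proofs are below) =====
def Claim_equal_filtra_alunos : Prop := ∀ (lista : List (String × Int)) (inscritos : List String) (media : Int), Dom_filtra_alunos lista inscritos media → Pre_filtra_alunos lista inscritos media → Spec_filtra_alunos lista inscritos media (filtra_alunos lista inscritos media)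
-- ===== LEMMAS AND PROOFS =====

theorem setswap {α : Type} : ∀ (pre : List α) (a b : α) (suf : List α),
    (((pre ++ a :: b :: suf).set pre.length b).set (pre.length + 1) a) = pre ++ b :: a :: suf := by
  intro pre a b suf
  induction pre with
  | nil => simp
  | cons x xs ih => simp [List.set]

theorem pvBubble (suf : List (String × Int)) : ∀ (pre : List (String × Int)) (a : String × Int),
    (PySem.List.pyRange (pre.length : Int) (((pre ++ a :: suf).length : Int) - 1) 1).foldl
        pvSwapStep (pre ++ a :: suf)
      = pre ++ suf ++ [a] := by
  induction suf with
  | nil =>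
    intro pre a
    rw [PySem.List.pyRange_one_eq_nil (by simp)]
    simp
  | cons b suf ih =>
    intro pre a
    rw [PySem.List.pyRange_one_cons (by simp; omega)]
    rw [List.foldl_cons]
    have hswap : pvSwapStep (pre ++ a :: b :: suf) (pre.length : Int) = pre ++ b :: a :: suf := by
      have h1 : PySem.List.pyGet? (pre ++ a :: b :: suf) ((pre.length : Int) + 1) = some b := by
        have := PySem.List.pyGet?_append_length (pre := pre ++ [a]) (y := b) (ys := suf)
        simpa using this
      have h2 : PySem.List.pyGet? (pre ++ a :: b :: suf) (pre.length : Int) = some a :=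
        PySem.List.pyGet?_append_length pre (b :: suf) a
      simp only [pvSwapStep, h1, h2]
      have hc : ((pre.length : Int) + 1) = ((pre.length + 1 : Nat) : Int) := by push_cast; ring
      rw [hc, PySem.List.pySetD_natCast, PySem.List.pySetD_natCast]
      exact setswap pre a b suf
    rw [hswap]
    have := ih (pre ++ [b]) a
    simp only [List.append_assoc, List.cons_append, List.length_append, List.length_cons] at this ⊢
    convert this using 3
    simp

theorem pvDelete (pre suf : List (String × Int)) (a : String × Int) :
    ((PySem.List.pyRange (pre.length : Int) (((pre ++ a :: suf).length : Int) - 1) 1).foldl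
        pvSwapStep (pre ++ a :: suf)).dropLast
      = pre ++ suf := by
  rw [pvBubble]
  simp


theorem pvStepShift (q : String × Int → Bool) (a : String × Int)
    (xs : List (String × Int)) (e : Int) (i : Int) (hi : 0 ≤ i) :
    pvDelStep q (a :: xs, e) (i + 1)
      = ((a :: (pvDelStep q (xs, e) i).1), (pvDelStep q (xs, e) i).2) := by
  obtain ⟨n, rfl⟩ : ∃ n : ℕ, i = (n : Int) := ⟨i.toNat, (Int.toNat_of_nonneg hi).symm⟩
  simp only [pvDelStep, PySem.List.pyGet?_cons_succ]
  cases h : PySem.List.pyGet? xs (n : Int) with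
  | none => simp
  | some v =>
    by_cases hq : q v
    · simp only [hq, if_pos]
      rw [PySem.List.pyGet?_natCast] at h
      obtain ⟨hlt, hv⟩ := List.getElem?_eq_some_iff.mp h
      have hdec : xs = xs.take n ++ v :: xs.drop (n + 1) := by
        rw [← hv, List.getElem_cons_drop, List.take_append_drop]
      have hlen : (xs.take n).length = n := List.length_take_of_le (le_of_lt hlt)
      have key1 := pvDelete (a :: xs.take n) (xs.drop (n + 1)) v
      have key2 := pvDelete (xs.take n) (xs.drop (n + 1)) v
      simp only [List.cons_append, ← hdec, List.length_cons, hlen] at key1 key2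
      push_cast at key1
      simp only [List.length_cons, Prod.mk.injEq]
      push_cast
      exact ⟨by rw [key1, key2], trivial⟩
    · simp [hq]

theorem pvFoldShift (q : String × Int → Bool) (a : String × Int) :
    ∀ (is_ : List Int), (∀ i ∈ is_, 0 ≤ i) → ∀ (xs : List (String × Int)) (e : Int),
    (is_.map (· + 1)).foldl (pvDelStep q) (a :: xs, e)
      = ((a :: (is_.foldl (pvDelStep q) (xs, e)).1), (is_.foldl (pvDelStep q) (xs, e)).2) := by
  intro is_
  induction is_ with
  | nil => intro _ xs e; rfl
  | cons i is ih =>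
    intro h xs e
    simp only [List.map_cons, List.foldl_cons, pvStepShift q a xs e i (h i (by simp))]
    exact ih (fun j hj => h j (by simp [hj])) _ _

theorem pvRangeSplit (n : ℕ) :
    PySem.List.pyRange (n : Int) (-1) (-1)
      = ((PySem.List.pyRange ((n : Int) - 1) (-1) (-1)).map (· + 1)) ++ [0] := by
  rw [PySem.List.pyRange_neg_one, PySem.List.pyRange_neg_one]
  have h1 : ((n : Int) - (-1)).toNat = n + 1 := by omega
  have h2 : ((n : Int) - 1 - (-1)).toNat = n := by omega
  rw [h1, h2, List.range_succ]
  simp only [List.map_append, List.map_map, List.map_cons, List.map_nil]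
  congr 1
  · apply List.map_congr_left
    intro k _
    simp [Function.comp]
    ring
  · simp

theorem pvDelLoop_eq (q : String × Int → Bool) :
    ∀ (xs : List (String × Int)) (e : Int),
    pvDelLoop q (xs, e) = (xs.filter (fun x => !(q x)), e + (xs.countP q : Int)) := by
  intro xs
  induction xs with
  | nil =>
    intro e
    simp only [pvDelLoop, List.length_nil]
    rw [PySem.List.pyRange_neg_one_eq_nil (by simp)]
    simp
  | cons a xs ih =>
    intro e
    simp only [pvDelLoop, List.length_cons] at *
    have hstart : ((xs.length + 1 : ℕ) : Int) - 1 = (xs.length : Int) := by push_cast; ring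
    rw [hstart, pvRangeSplit, List.foldl_append,
      pvFoldShift q a _ (fun i hi => by
        have := (PySem.List.mem_pyRange_neg_one.mp hi).1; omega) xs e,
      ih e]
    simp only [List.foldl_cons, List.foldl_nil, pvDelStep, PySem.List.pyGet?_zero_cons]
    by_cases hq : q a
    · simp only [hq, if_pos]
      have hd := pvDelete [] (xs.filter (fun x => !(q x))) a
      simp only [List.nil_append, List.length_nil, Nat.cast_zero, List.length_cons] at hd
      have harg : ((xs.filter (fun x => !(q x))).length + 1 : ℕ) = ((xs.filter (fun x => !(q x))).length : Int) + 1 := by push_cast; ring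
      rw [harg] at hd
      norm_num at hd
      simp only [Prod.mk.injEq]
      refine ⟨?_, ?_⟩
      · simp only [List.filter_cons, hq, Bool.not_true]
        simpa using hd
      · simp [hq]
        ring
    · simp [hq]

theorem pvEqual (lista : List (String × Int)) (inscritos : List String) (media : Int)
    (hp : inscritos ≠ []) :
    filtra_alunos lista inscritos media = filtra_alunos_alt lista inscritos media := by
  have hlen : (inscritos.length : Int) ≠ 0 := by
    intro h
    exact hp (List.eq_nil_of_length_eq_zero (by exact_mod_cast h))
  simp only [filtra_alunos, filtra_alunos_alt, if_pos hlen]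
  set q1 : String × Int → Bool := fun a => !(inscritos.contains a.1) with hq1
  set q2 : String × Int → Bool := fun a => decide (a.2 < media) with hq2
  rw [pvDelLoop_eq q1 lista 0]
  rw [pvDelLoop_eq q2]
  set F1 := lista.filter (fun x => !(q1 x)) with hF1
  have c1 : lista.countP q1 + F1.length = lista.length := by
    rw [hF1, ← List.countP_eq_length_filter]
    simpa using List.length_eq_countP_add_countP (p := q1) (l := lista) |>.symm
  have c2 : F1.countP q2 + (F1.filter (fun x => !(q2 x))).length = F1.length := by
    rw [← List.countP_eq_length_filter]
    simpa using List.length_eq_countP_add_countP (p := q2) (l := F1) |>.symm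
  have c3 : F1.filter (fun x => !(q2 x))
      = lista.filter (fun a => inscritos.contains a.1 && decide (media ≤ a.2)) := by
    rw [hF1, List.filter_filter]
    refine List.filter_congr (fun x _ => ?_)
    simp only [hq1, hq2, Bool.not_not]
    rw [Bool.and_comm]
    congr 1
    rw [← decide_not]
    simp
  rw [c3] at c2
  simp only []
  omega

-- ===== VERDICT (by name: the statement is the Claim_ definition above) =====
theorem filtra_alunos_spec : Claim_equal_filtra_alunos :=
  fun lista inscritos media _ hp => pvEqual lista inscritos media hp
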